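-- pv_equiv track=rewrite | github.com/ValentinUnileon/SokobanSolver | main.py | isNearWallWithOutGoal
-- ===== SOURCE A (Python) =====
-- def isNearWallWithOutGoal(x, y, puzzle): #no hace falta comprobar si se va a mover hacia una pared
--
--     if puzzle[y][x] == "$": #Entonces va a mover una caja
--
--         if puzzle[y + 1][x] in {"@", "*"} and puzzle[y - 1][x] != ".":
--
--             if puzzle[y-2][x] in {"#", "!"} and puzzle[y-2][x+1] in {"#", "!"} and puzzle[y-2][x-1] in {"#", "!"}:
--                 #si tiene 3 cajas alrededor hay que comprobar si hay un . en su vertical porque si no es un movimiento invalido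
--                 #ahora hay que comprobar si la horizontal tiene algun .
--                 for row in puzzle[y-1]:
--                     if row == ".":
--                         return False #Puede moverse a esa posicion
--
--                 return True
--
--         if puzzle[y - 1][x] in {"@", "*"} and puzzle[y + 1][x] != ".":
--
--             if puzzle[y+2][x] in {"#", "!"} and puzzle[y+2][x+1] in {"#", "!"} and puzzle[y+2][x-1] in {"#", "!"}:
--
--                 for row in puzzle[y+1]:
--                     if row == ".":
--                         return False # Puede moverse a esa posicion
--
--                 return True
--
--         if puzzle[y][x+1] in {"@", "*"} and puzzle[y][x-1] != ".":
--
--             if puzzle[y][x-2] in {"#", "!"} and puzzle[y+1][x-2] in {"#", "!"} and puzzle[y-1][x-2] in {"#", "!"}: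
--
--                 for i in range(len(puzzle)):
--                     cell = puzzle[i][x-1]
--                     if cell == ".":
--                         return False  # Puede moverse a esa posición
--
--                 return True
--
--         if puzzle[y][x-1] in {"@", "*"} and puzzle[y][x+1] != ".":
--
--             if puzzle[y][x+2] in {"#", "!"} and puzzle[y+1][x+2] in {"#", "!"} and puzzle[y-1][x+2] in {"#", "!"}:  #falta implementar fullLineWallX()
--
--                 for i in range(len(puzzle)):
--                     cell = puzzle[i][x+1]
--                     if cell == ".":
--                         return False  # Puede moverse a esa posición
--
--                 return True
--
--
--     return False
-- ===== SOURCE B (Python) =====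
-- def _at(puzzle, r, c):
--     try:
--         return puzzle[r][c]
--     except IndexError:
--         return ""
--
--
-- def _cell(row, c):
--     try:
--         return row[c]
--     except IndexError:
--         return ""
--
--
-- def _rot(w):
--     # rotate the 5x5 window 90 degrees clockwise
--     return [[w[4 - j][i] for j in range(5)] for i in range(5)]
--
--
-- def _fits(w):
--     # canonical deadlock pattern: pusher below the box, landing cell above is
--     # not a goal, and a 3-cell wall segment caps the landing cell from above
--     return (w[3][2] in ("@", "*") and w[1][2] != "."
--             and all(w[0][k] in ("#", "!") for k in (1, 2, 3)))
--
--
-- def isNearWallWithOutGoal(x, y, puzzle):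
--     if puzzle[y][x] != "$":
--         return False
--     w0 = [[_at(puzzle, y + dy, x + dx) for dx in range(-2, 3)] for dy in range(-2, 3)]
--     w1 = _rot(w0)
--     w2 = _rot(w1)
--     w3 = _rot(w2)
--     for w, kind, t in ((w0, "row", y - 1), (w2, "row", y + 1),
--                        (w1, "col", x - 1), (w3, "col", x + 1)):
--         if _fits(w):
--             if kind == "row":
--                 return "." not in puzzle[t]
--             return all(_cell(row, t) != "." for row in puzzle)
--     return False
-- ===== Notes on version B (the rewrite author's own statement) =====
-- stated objective: alternative
-- what changed: B materializes the 5x5 neighbourhood around the box as a grid via a total safe accessor and rotates it, so all four of A's hand-written directional blocks become a single canonical push-pattern check applied to the four rotations; same asymptotic cost.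
import Mathlib
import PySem

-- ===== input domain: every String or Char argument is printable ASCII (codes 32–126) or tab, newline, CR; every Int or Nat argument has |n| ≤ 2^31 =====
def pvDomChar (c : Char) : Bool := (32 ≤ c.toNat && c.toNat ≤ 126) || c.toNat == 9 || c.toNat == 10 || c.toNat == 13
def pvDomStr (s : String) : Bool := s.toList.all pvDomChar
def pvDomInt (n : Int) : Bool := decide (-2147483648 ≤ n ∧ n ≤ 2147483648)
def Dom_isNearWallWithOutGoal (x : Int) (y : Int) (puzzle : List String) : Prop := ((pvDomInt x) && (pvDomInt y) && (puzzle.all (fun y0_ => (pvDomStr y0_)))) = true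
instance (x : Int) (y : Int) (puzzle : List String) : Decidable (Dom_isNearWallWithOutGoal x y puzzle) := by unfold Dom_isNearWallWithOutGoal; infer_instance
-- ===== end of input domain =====

-- B replaces A's four hand-written direction blocks by one canonical push-pattern checked
-- on the four rotations of the materialized 5x5 neighbourhood of the box (same cost);
-- equivalence is proved on Pre_, exactly the inputs where the Python A returns
-- (elsewhere A raises IndexError).

-- ===== PORT A =====
-- totalized cell read: puzzle[y][x] with Python negative-index semantics; the
-- default '?' is only reachable where the Python raises (outside Pre_)
def pvCell (puzzle : List String) (y x : Int) : Char :=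
  match PySem.List.pyGet? puzzle y with
  | some row => (PySem.Str.pyGet? row x).getD '?'
  | none => '?'

-- 'for row in puzzle[y±1]: if row == ".": return False / return True'
def pvScanRowA : List Char → Bool
  | [] => true
  | c :: cs => if c == '.' then false else pvScanRowA cs

-- 'for i in range(len(puzzle)): cell = puzzle[i][x±1] …' — range(len) indexing iterates
-- the rows in order, exact; the char access is totalized like pvCell
def pvScanColA (x : Int) : List String → Bool
  | [] => true
  | r :: rs => if (PySem.Str.pyGet? r x).getD '?' == '.' then false else pvScanColA x rs

-- the four non-elif blocks of A; 'some r' = the block returned r, 'none' = fall through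
def pvBlk1 (x y : Int) (puzzle : List String) : Option Bool :=
  if (pvCell puzzle (y+1) x == '@' || pvCell puzzle (y+1) x == '*') && !(pvCell puzzle (y-1) x == '.') then
    if (pvCell puzzle (y-2) x == '#' || pvCell puzzle (y-2) x == '!') &&
       (pvCell puzzle (y-2) (x+1) == '#' || pvCell puzzle (y-2) (x+1) == '!') &&
       (pvCell puzzle (y-2) (x-1) == '#' || pvCell puzzle (y-2) (x-1) == '!') then
      some (pvScanRowA ((PySem.List.pyGet? puzzle (y-1)).getD "").toList)
    else none
  else none

def pvBlk2 (x y : Int) (puzzle : List String) : Option Bool :=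
  if (pvCell puzzle (y-1) x == '@' || pvCell puzzle (y-1) x == '*') && !(pvCell puzzle (y+1) x == '.') then
    if (pvCell puzzle (y+2) x == '#' || pvCell puzzle (y+2) x == '!') &&
       (pvCell puzzle (y+2) (x+1) == '#' || pvCell puzzle (y+2) (x+1) == '!') &&
       (pvCell puzzle (y+2) (x-1) == '#' || pvCell puzzle (y+2) (x-1) == '!') then
      some (pvScanRowA ((PySem.List.pyGet? puzzle (y+1)).getD "").toList)
    else none
  else none

def pvBlk3 (x y : Int) (puzzle : List String) : Option Bool :=
  if (pvCell puzzle y (x+1) == '@' || pvCell puzzle y (x+1) == '*') && !(pvCell puzzle y (x-1) == '.') then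
    if (pvCell puzzle y (x-2) == '#' || pvCell puzzle y (x-2) == '!') &&
       (pvCell puzzle (y+1) (x-2) == '#' || pvCell puzzle (y+1) (x-2) == '!') &&
       (pvCell puzzle (y-1) (x-2) == '#' || pvCell puzzle (y-1) (x-2) == '!') then
      some (pvScanColA (x-1) puzzle)
    else none
  else none

def pvBlk4 (x y : Int) (puzzle : List String) : Option Bool :=
  if (pvCell puzzle y (x-1) == '@' || pvCell puzzle y (x-1) == '*') && !(pvCell puzzle y (x+1) == '.') then
    if (pvCell puzzle y (x+2) == '#' || pvCell puzzle y (x+2) == '!') &&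
       (pvCell puzzle (y+1) (x+2) == '#' || pvCell puzzle (y+1) (x+2) == '!') &&
       (pvCell puzzle (y-1) (x+2) == '#' || pvCell puzzle (y-1) (x+2) == '!') then
      some (pvScanColA (x+1) puzzle)
    else none
  else none

def isNearWallWithOutGoal (x : Int) (y : Int) (puzzle : List String) : Bool :=
  if pvCell puzzle y x == '$' then
    (((pvBlk1 x y puzzle).orElse fun _ =>
      ((pvBlk2 x y puzzle).orElse fun _ =>
       ((pvBlk3 x y puzzle).orElse fun _ => pvBlk4 x y puzzle)))).getD false
  else none |>.getD false

-- ===== PORT B =====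
-- Source B's _at(puzzle, r, c): 'try: return puzzle[r][c] except IndexError: return ""';
-- the out-of-range result "" is modelled by '?', exact for every comparison B performs
-- (B only ever tests membership in {'@','*'}, {'#','!'} or inequality with '.')
def pvAtB (puzzle : List String) (r c : Int) : Char :=
  match PySem.List.pyGet? puzzle r with
  | some row => (PySem.Str.pyGet? row c).getD '?'
  | none => '?'

-- Source B's _cell(row, c), same totalization on a single row
def pvCellB (row : String) (c : Int) : Char := (PySem.Str.pyGet? row c).getD '?'

-- the 5x5 neighbourhood window around (x, y)
def pvWin (x y : Int) (puzzle : List String) : List (List Char) :=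
  (PySem.List.pyRange (-2) 3 1).map fun dy =>
    (PySem.List.pyRange (-2) 3 1).map fun dx => pvAtB puzzle (y + dy) (x + dx)

-- _rot: rotate the 5x5 window 90 degrees clockwise; indices are always in range,
-- so plain getD transliterates python's w[4-j][i]
def pvRot (w : List (List Char)) : List (List Char) :=
  (PySem.List.pyRange 0 5 1).map fun i =>
    (PySem.List.pyRange 0 5 1).map fun j =>
      ((PySem.List.pyGet? ((PySem.List.pyGet? w (4 - j)).getD []) i).getD '?')

-- _fits: the canonical deadlock pattern on a window
def pvFits (w : List (List Char)) : Bool :=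
  let g : Nat → Nat → Char := fun i j => ((w.getD i []).getD j '?')
  (g 3 2 == '@' || g 3 2 == '*') && !(g 1 2 == '.') &&
  ([1, 2, 3].all fun k => g 0 k == '#' || g 0 k == '!')

-- the for-loop over the four (window, scan-kind, target) triples
def pvBLoop (puzzle : List String) : List (List (List Char) × String × Int) → Bool
  | [] => false
  | (w, kind, t) :: rest =>
    if pvFits w then
      if kind == "row" then
        !(((PySem.List.pyGet? puzzle t).getD "").toList.contains '.')
      else
        puzzle.all fun row => !(pvCellB row t == '.')
    else pvBLoop puzzle rest

def isNearWallWithOutGoal_alt (x : Int) (y : Int) (puzzle : List String) : Bool :=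
  if !(pvAtB puzzle y x == '$') then false
  else
    let w0 := pvWin x y puzzle
    let w1 := pvRot w0
    let w2 := pvRot w1
    let w3 := pvRot w2
    pvBLoop puzzle [(w0, "row", y - 1), (w2, "row", y + 1), (w1, "col", x - 1), (w3, "col", x + 1)]

-- ===== PRECONDITION & SPEC =====
-- Pre_ holds exactly on the inputs where the Python A returns normally: every cell access
-- A performs along its short-circuit path must be a valid (possibly negative) Python index;
-- elsewhere A raises IndexError. pvCellOpt is the optional cell read the conditions inspect.
def pvCellOpt (puzzle : List String) (y x : Int) : Option Char :=
  (PySem.List.pyGet? puzzle y).bind (fun r => PySem.Str.pyGet? r x)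

def pvColCell (puzzle : List String) (i : Nat) (x : Int) : Option Char :=
  PySem.Str.pyGet? (puzzle.getD i "") x

def pvImp (a b : Bool) : Bool := !a || b

def pvOkB (p : List String) (y x : Int) : Bool := (pvCellOpt p y x).isSome
def pvPushB (p : List String) (y x : Int) : Bool := pvCellOpt p y x == some '@' || pvCellOpt p y x == some '*'
def pvWallB (p : List String) (y x : Int) : Bool := pvCellOpt p y x == some '#' || pvCellOpt p y x == some '!'

-- the column scan of blocks 3/4 raises only at the first row (in order) shorter than the
-- scanned column, and only if no earlier row already held '.' there
def pvScanOkB (p : List String) (c : Int) : Bool :=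
  (List.range p.length).all fun i =>
    pvImp ((List.range i).all fun j => pvColCell p j c != some '.') (pvColCell p i c).isSome

-- pvAccBk = every cell access of block k (along its short-circuit path) is in range;
-- pvFireBk = block k's full condition holds, so A returns inside block k
def pvAccB1 (x y : Int) (p : List String) : Bool :=
  pvOkB p (y+1) x && pvImp (pvPushB p (y+1) x)
    (pvOkB p (y-1) x && pvImp (pvCellOpt p (y-1) x != some '.')
      (pvOkB p (y-2) x && pvImp (pvWallB p (y-2) x)
        (pvOkB p (y-2) (x+1) && pvImp (pvWallB p (y-2) (x+1)) (pvOkB p (y-2) (x-1)))))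

def pvFireB1 (x y : Int) (p : List String) : Bool :=
  pvPushB p (y+1) x && pvCellOpt p (y-1) x != some '.' &&
  pvWallB p (y-2) x && pvWallB p (y-2) (x+1) && pvWallB p (y-2) (x-1)

def pvAccB2 (x y : Int) (p : List String) : Bool :=
  pvOkB p (y-1) x && pvImp (pvPushB p (y-1) x)
    (pvImp (pvCellOpt p (y+1) x != some '.')
      (pvOkB p (y+2) x && pvImp (pvWallB p (y+2) x)
        (pvOkB p (y+2) (x+1) && pvImp (pvWallB p (y+2) (x+1)) (pvOkB p (y+2) (x-1)))))

def pvFireB2 (x y : Int) (p : List String) : Bool :=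
  pvPushB p (y-1) x && pvCellOpt p (y+1) x != some '.' &&
  pvWallB p (y+2) x && pvWallB p (y+2) (x+1) && pvWallB p (y+2) (x-1)

def pvAccB3 (x y : Int) (p : List String) : Bool :=
  pvOkB p y (x+1) && pvImp (pvPushB p y (x+1))
    (pvOkB p y (x-1) && pvImp (pvCellOpt p y (x-1) != some '.')
      (pvOkB p y (x-2) && pvImp (pvWallB p y (x-2))
        (pvOkB p (y+1) (x-2) && pvImp (pvWallB p (y+1) (x-2))
          (pvOkB p (y-1) (x-2) && pvImp (pvWallB p (y-1) (x-2)) (pvScanOkB p (x-1))))))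

def pvFireB3 (x y : Int) (p : List String) : Bool :=
  pvPushB p y (x+1) && pvCellOpt p y (x-1) != some '.' &&
  pvWallB p y (x-2) && pvWallB p (y+1) (x-2) && pvWallB p (y-1) (x-2)

def pvAccB4 (x y : Int) (p : List String) : Bool :=
  pvOkB p y (x-1) && pvImp (pvPushB p y (x-1))
    (pvImp (pvCellOpt p y (x+1) != some '.')
      (pvOkB p y (x+2) && pvImp (pvWallB p y (x+2))
        (pvOkB p (y+1) (x+2) && pvImp (pvWallB p (y+1) (x+2))
          (pvOkB p (y-1) (x+2) && pvImp (pvWallB p (y-1) (x+2)) (pvScanOkB p (x+1))))))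

def Pre_isNearWallWithOutGoal (x : Int) (y : Int) (puzzle : List String) : Prop :=
  (pvOkB puzzle y x && pvImp (pvCellOpt puzzle y x == some '$')
    (pvAccB1 x y puzzle && pvImp (!pvFireB1 x y puzzle)
      (pvAccB2 x y puzzle && pvImp (!pvFireB2 x y puzzle)
        (pvAccB3 x y puzzle && pvImp (!pvFireB3 x y puzzle) (pvAccB4 x y puzzle))))) = true

instance (x : Int) (y : Int) (puzzle : List String) : Decidable (Pre_isNearWallWithOutGoal x y puzzle) := by
  unfold Pre_isNearWallWithOutGoal; infer_instance

def pvWitness_isNearWallWithOutGoal : Int × Int × List String := (0, 0, ["#"])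

def Spec_isNearWallWithOutGoal (x : Int) (y : Int) (puzzle : List String) (out : Bool) : Prop := out = isNearWallWithOutGoal_alt x y puzzle
instance (x : Int) (y : Int) (puzzle : List String) (out : Bool) : Decidable (Spec_isNearWallWithOutGoal x y puzzle out) := by unfold Spec_isNearWallWithOutGoal; infer_instance

-- ===== CLAIM (what is proved, stated in full; the proofs are below) =====
def Claim_equal_isNearWallWithOutGoal : Prop := ∀ (x : Int) (y : Int) (puzzle : List String), Dom_isNearWallWithOutGoal x y puzzle → Pre_isNearWallWithOutGoal x y puzzle → Spec_isNearWallWithOutGoal x y puzzle (isNearWallWithOutGoal x y puzzle)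

-- ===== LEMMAS AND PROOFS =====

lemma pvScanRow_eq (l : List Char) : pvScanRowA l = !(l.contains '.') := by
  induction l with
  | nil => rfl
  | cons c cs ih =>
    simp only [pvScanRowA, List.contains_cons]
    cases h : c == '.' <;> simp_all [BEq.comm]

lemma pvScanCol_eq (x : Int) (ps : List String) :
    pvScanColA x ps = ps.all fun r => !(pvCellB r x == '.') := by
  induction ps with
  | nil => rfl
  | cons r rs ih =>
    simp only [pvScanColA, List.all_cons]
    cases h : pvCellB r x == '.' <;> simp_all [pvCellB]

lemma pvAtB_cell : pvAtB = pvCell := rfl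

-- B's whole body evaluates (windows, rotations, loop) to a flat if-tree; pure computation
lemma alt_eval (x y : Int) (p : List String) : isNearWallWithOutGoal_alt x y p =
  (if !(pvAtB p y x == '$') then false else
    if (pvAtB p (y + 1) (x + 0) == '@' || pvAtB p (y + 1) (x + 0) == '*') && !(pvAtB p (y + (-1)) (x + 0) == '.') &&
       ((pvAtB p (y + (-2)) (x + (-1)) == '#' || pvAtB p (y + (-2)) (x + (-1)) == '!') &&
        ((pvAtB p (y + (-2)) (x + 0) == '#' || pvAtB p (y + (-2)) (x + 0) == '!') &&
         ((pvAtB p (y + (-2)) (x + 1) == '#' || pvAtB p (y + (-2)) (x + 1) == '!') && true))) then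
      !(((PySem.List.pyGet? p (y - 1)).getD "").toList.contains '.')
    else if (pvAtB p (y + (-1)) (x + 0) == '@' || pvAtB p (y + (-1)) (x + 0) == '*') && !(pvAtB p (y + 1) (x + 0) == '.') &&
       ((pvAtB p (y + 2) (x + 1) == '#' || pvAtB p (y + 2) (x + 1) == '!') &&
        ((pvAtB p (y + 2) (x + 0) == '#' || pvAtB p (y + 2) (x + 0) == '!') &&
         ((pvAtB p (y + 2) (x + (-1)) == '#' || pvAtB p (y + 2) (x + (-1)) == '!') && true))) then
      !(((PySem.List.pyGet? p (y + 1)).getD "").toList.contains '.')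
    else if (pvAtB p (y + 0) (x + 1) == '@' || pvAtB p (y + 0) (x + 1) == '*') && !(pvAtB p (y + 0) (x + (-1)) == '.') &&
       ((pvAtB p (y + 1) (x + (-2)) == '#' || pvAtB p (y + 1) (x + (-2)) == '!') &&
        ((pvAtB p (y + 0) (x + (-2)) == '#' || pvAtB p (y + 0) (x + (-2)) == '!') &&
         ((pvAtB p (y + (-1)) (x + (-2)) == '#' || pvAtB p (y + (-1)) (x + (-2)) == '!') && true))) then
      p.all fun row => !(pvCellB row (x - 1) == '.')
    else if (pvAtB p (y + 0) (x + (-1)) == '@' || pvAtB p (y + 0) (x + (-1)) == '*') && !(pvAtB p (y + 0) (x + 1) == '.') &&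
       ((pvAtB p (y + (-1)) (x + 2) == '#' || pvAtB p (y + (-1)) (x + 2) == '!') &&
        ((pvAtB p (y + 0) (x + 2) == '#' || pvAtB p (y + 0) (x + 2) == '!') &&
         ((pvAtB p (y + 1) (x + 2) == '#' || pvAtB p (y + 1) (x + 2) == '!') && true))) then
      p.all fun row => !(pvCellB row (x + 1) == '.')
    else false) := rfl

lemma pv_if2 (c1 c2 : Bool) (s : Bool) :
    (if c1 then (if c2 then some s else none) else (none : Option Bool)) =
    (if c1 && c2 then some s else none) := by
  cases c1 <;> cases c2 <;> rfl

lemma pv_orElse_getD (c s : Bool) (t : Unit → Option Bool) :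
    (((if c then some s else none) : Option Bool).orElse t).getD false =
    if c then s else (t ()).getD false := by
  cases c <;> rfl

lemma pv_perm1 (u a b c : Bool) : (u && (a && b && c)) = (u && (c && (a && (b && true)))) := by
  cases u <;> cases a <;> cases b <;> cases c <;> rfl
lemma pv_perm2 (u a b c : Bool) : (u && (a && b && c)) = (u && (b && (a && (c && true)))) := by
  cases u <;> cases a <;> cases b <;> cases c <;> rfl

lemma pv_getD (c s : Bool) : ((if c then some s else none : Option Bool).getD false) = (if c then s else false) := by
  cases c <;> rfl

lemma pv_main (x y : Int) (puzzle : List String) :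
    isNearWallWithOutGoal x y puzzle = isNearWallWithOutGoal_alt x y puzzle := by
  have e0 : ∀ a : Int, a + 0 = a := fun a => by ring
  have e1 : ∀ a : Int, a + (-1) = a - 1 := fun a => by ring
  have e2 : ∀ a : Int, a + (-2) = a - 2 := fun a => by ring
  cases h : pvCell puzzle y x == '$'
  · simp [isNearWallWithOutGoal, alt_eval, pvAtB_cell, h]
  · rw [alt_eval]
    simp only [pvAtB_cell, e0, e1, e2, h, Bool.not_true, Bool.false_eq_true, if_false]
    unfold isNearWallWithOutGoal pvBlk1 pvBlk2 pvBlk3 pvBlk4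
    simp only [h, if_true, pv_if2, pv_orElse_getD, pv_getD]
    rw [pvScanRow_eq, pvScanRow_eq, pvScanCol_eq, pvScanCol_eq]
    rw [pv_perm1 _ _ _ _, pv_perm2, pv_perm2, pv_perm1]

-- ===== VERDICT (by name: the statement is the Claim_ definition above) =====
theorem isNearWallWithOutGoal_spec : Claim_equal_isNearWallWithOutGoal := by
  intro x y puzzle _ _
  unfold Spec_isNearWallWithOutGoal
  exact pv_main x y puzzle
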